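-- pv_equiv track=rewrite | github.com/vishal7090/md-generator | src/md_generator/image/emit.py | markdown_best
-- ===== SOURCE A (Python) =====
-- def normalize_whitespace(text: str) -> str:
--     """Strip trailing spaces per line; collapse consecutive blank lines to one."""
--     lines = [line.rstrip() for line in text.splitlines()]
--     out: list[str] = []
--     prev_blank = False
--     for ln in lines:
--         if not ln.strip():
--             if not prev_blank:
--                 out.append("")
--             prev_blank = True
--         else:
--             prev_blank = False
--             out.append(ln)
--     return "\n".join(out).strip()
--
-- def markdown_best(title: str, sections: list[tuple[str, str]]) -> str:
--     """sections: (image_filename, chosen_plain_text)."""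
--     parts: list[str] = [f"# {title}", ""]
--     for filename, raw in sections:
--         parts.append(f"## {filename}")
--         parts.append("")
--         body = normalize_whitespace(raw)
--         parts.append(body if body else "_No text extracted._")
--         parts.append("")
--     return "\n".join(parts).rstrip() + "\n"
-- ===== SOURCE B (Python) =====
-- def normalize_whitespace(text: str) -> str:
--     """Split into paragraphs (maximal runs of non-blank lines) and rejoin them."""
--     lines = [line.rstrip() for line in text.splitlines()]
--     paragraphs = []
--     i, n = 0, len(lines)
--     while i < n:
--         if not lines[i].strip():
--             i += 1
--         else:
--             j = i + 1
--             while j < n and lines[j].strip():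
--                 j += 1
--             paragraphs.append(lines[i:j])
--             i = j
--     return "\n\n".join("\n".join(p) for p in paragraphs).strip()
--
-- def markdown_best(title: str, sections: list[tuple[str, str]]) -> str:
--     """sections: (image_filename, chosen_plain_text)."""
--     blocks = ["# " + title] + [
--         "## " + filename + "\n\n"
--         + (normalize_whitespace(raw) or "_No text extracted._")
--         for filename, raw in sections
--     ]
--     return "\n\n".join(blocks).rstrip() + "\n"
-- ===== Notes on version B (the rewrite author's own statement) =====
-- stated objective: alternative
-- what changed: normalize_whitespace is reformulated as paragraph extraction: it slices the lines into maximal runs of non-blank lines and joins those paragraphs with '\n\n' (never materializing blank separator lines), and markdown_best assembles one block per section joined with '\n\n' instead of a flat parts list with '' separators joined with '\n'.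
import Mathlib
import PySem

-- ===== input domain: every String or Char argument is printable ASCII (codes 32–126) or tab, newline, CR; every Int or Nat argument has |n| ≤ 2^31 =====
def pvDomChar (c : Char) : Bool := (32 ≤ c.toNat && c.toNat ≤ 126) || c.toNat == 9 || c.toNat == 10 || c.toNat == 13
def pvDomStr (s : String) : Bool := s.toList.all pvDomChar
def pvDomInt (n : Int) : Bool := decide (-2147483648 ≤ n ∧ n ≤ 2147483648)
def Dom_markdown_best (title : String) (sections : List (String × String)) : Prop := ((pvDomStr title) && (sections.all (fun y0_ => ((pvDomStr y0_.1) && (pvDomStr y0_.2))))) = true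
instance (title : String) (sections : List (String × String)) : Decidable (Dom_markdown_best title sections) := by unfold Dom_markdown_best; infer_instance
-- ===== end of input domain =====

-- ===== PORT A =====
-- B reframes the normalization as paragraph extraction (maximal runs of non-blank
-- lines joined with "\n\n", no blank separator lines ever materialized) and builds
-- the report from per-section blocks joined with "\n\n" instead of a flat parts
-- list with "" separators joined with "\n" (objective: alternative; same cost).
def pvBlank (ln : String) : Bool := (PySem.Str.strip ln).toList.isEmpty

def normalize_whitespace (text : String) : String :=
  let lines := (PySem.Str.splitlines text).map (fun l => PySem.Str.rstrip l)
  let st := lines.foldl (fun (st : List String × Bool) ln =>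
      if pvBlank ln then
        ((if st.2 then st.1 else st.1 ++ [""]), true)
      else
        (st.1 ++ [ln], false)) ([], false)
  PySem.Str.strip (PySem.Str.join "\n" st.1)

def markdown_best (title : String) (sections : List (String × String)) : String :=
  let parts : List String := ["# " ++ title, ""]
  let parts := sections.foldl (fun parts sec =>
      let body := normalize_whitespace sec.2
      parts ++ ["## " ++ sec.1, "",
                (if body.toList.isEmpty then "_No text extracted._" else body), ""]) parts
  PySem.Str.rstrip (PySem.Str.join "\n" parts) ++ "\n"

-- ===== PORT B =====
-- outer while of Source B: skip a blank line, or slice off the maximal non-blank run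
-- (the inner scan 'while j < n and lines[j].strip()' is the takeWhile/dropWhile split)
def pvParagraphs : List String → List (List String)
  | [] => []
  | l :: rest =>
    if pvBlank l then pvParagraphs rest
    else (l :: rest.takeWhile (fun x => !pvBlank x)) ::
         pvParagraphs (rest.dropWhile (fun x => !pvBlank x))
termination_by ls => ls.length
decreasing_by
  · exact Nat.lt_succ_self rest.length
  · exact Nat.lt_succ_of_le (List.length_dropWhile_le _ rest)

def normalize_whitespace_alt (text : String) : String :=
  let lines := (PySem.Str.splitlines text).map (fun l => PySem.Str.rstrip l)
  PySem.Str.strip (PySem.Str.join "\n\n"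
    ((pvParagraphs lines).map (fun p => PySem.Str.join "\n" p)))

def markdown_best_alt (title : String) (sections : List (String × String)) : String :=
  let blocks : List String :=
    ("# " ++ title) :: sections.map (fun sec =>
      let body := normalize_whitespace_alt sec.2
      "## " ++ sec.1 ++ "\n\n" ++
        (if body.toList.isEmpty then "_No text extracted._" else body))
  PySem.Str.rstrip (PySem.Str.join "\n\n" blocks) ++ "\n"

-- ===== PRECONDITION & SPEC =====
def Spec_markdown_best (title : String) (sections : List (String × String)) (out : String) : Prop := out = markdown_best_alt title sections
instance (title : String) (sections : List (String × String)) (out : String) : Decidable (Spec_markdown_best title sections out) := by unfold Spec_markdown_best; infer_instance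

-- ===== CLAIM (what is proved, stated in full; the proofs are below) =====
def Claim_equal_markdown_best : Prop := ∀ (title : String) (sections : List (String × String)), Dom_markdown_best title sections → Spec_markdown_best title sections (markdown_best title sections)

-- ===== LEMMAS AND PROOFS =====

-- proof-side characterization of A's prev_blank state machine: collapse blank runs
def collapseRuns (ls : List String) : List String :=
  match ls with
  | [] => []
  | l :: rest =>
    if pvBlank l then
      "" :: collapseRuns (rest.dropWhile pvBlank)
    else
      l :: collapseRuns rest
termination_by ls.length
decreasing_by
  · exact Nat.lt_succ_of_le (List.length_dropWhile_le pvBlank rest)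
  · exact Nat.lt_succ_self rest.length

theorem foldl_eq_collapseRuns (lines : List String) :
    (∀ out : List String,
        (lines.foldl (fun (st : List String × Bool) ln =>
          if pvBlank ln then ((if st.2 then st.1 else st.1 ++ [""]), true)
          else (st.1 ++ [ln], false)) (out, false)).1 = out ++ collapseRuns lines) ∧
    (∀ out : List String,
        (lines.foldl (fun (st : List String × Bool) ln =>
          if pvBlank ln then ((if st.2 then st.1 else st.1 ++ [""]), true)
          else (st.1 ++ [ln], false)) (out, true)).1
          = out ++ collapseRuns (lines.dropWhile pvBlank)) := by
  induction lines with
  | nil => simp [collapseRuns]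
  | cons l ls ih =>
    constructor <;> intro out <;> by_cases h : pvBlank l = true <;>
      simp [List.foldl_cons, h, collapseRuns, ih.1, ih.2]

-- string-level join/strip facts used by the inductions
theorem sjoin_nil (sep : String) : PySem.Str.join sep [] = "" := rfl

theorem sjoin_single (sep p : String) : PySem.Str.join sep [p] = p := by
  apply String.toList_inj.mp
  simp [PySem.Str.toList_join, PySem.Chars.join_singleton]

theorem sjoin_cons (sep p q : String) (rest : List String) :
    PySem.Str.join sep (p :: q :: rest) = p ++ sep ++ PySem.Str.join sep (q :: rest) := by
  apply String.toList_inj.mp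
  simp [PySem.Str.toList_join, PySem.Chars.join_cons_cons]

theorem sjoin_cons_ne (sep p : String) (ys : List String) (h : ys ≠ []) :
    PySem.Str.join sep (p :: ys) = p ++ sep ++ PySem.Str.join sep ys := by
  cases ys with
  | nil => exact absurd rfl h
  | cons q rest => exact sjoin_cons sep p q rest

theorem sjoin_append (sep : String) (xs ys : List String) (hx : xs ≠ []) (hy : ys ≠ []) :
    PySem.Str.join sep (xs ++ ys) = PySem.Str.join sep xs ++ sep ++ PySem.Str.join sep ys := by
  induction xs with
  | nil => exact absurd rfl hx
  | cons x xs ih =>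
    cases xs with
    | nil =>
      simp only [List.nil_append, List.cons_append, sjoin_single]
      exact sjoin_cons_ne sep x ys hy
    | cons x' xs' =>
      rw [List.cons_append, sjoin_cons_ne sep x ((x' :: xs') ++ ys) (by simp),
          ih (by simp), sjoin_cons sep x x' xs']
      simp [String.append_assoc]

theorem chars_rstrip_nl (cs : List Char) :
    PySem.Chars.rstrip (cs ++ ['\n']) = PySem.Chars.rstrip cs := by
  simp [PySem.Chars.rstrip, show PySem.Chars.isspace '\n' = true from rfl]

theorem chars_strip_cons_nl (cs : List Char) :
    PySem.Chars.strip ('\n' :: cs) = PySem.Chars.strip cs := by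
  simp [PySem.Chars.strip, PySem.Chars.lstrip,
        show PySem.Chars.isspace '\n' = true from rfl]

theorem chars_strip_app_nl (cs : List Char) :
    PySem.Chars.strip (cs ++ ['\n']) = PySem.Chars.strip cs := by
  unfold PySem.Chars.strip PySem.Chars.lstrip
  rw [List.dropWhile_append]
  by_cases h : (List.dropWhile PySem.Chars.isspace cs).isEmpty = true
  · simp only [h, if_true]
    rw [List.isEmpty_iff.mp h]
    simp [show PySem.Chars.isspace '\n' = true from rfl, PySem.Chars.rstrip]
  · simp only [h]
    exact chars_rstrip_nl _

theorem srstrip_nl (s : String) : PySem.Str.rstrip (s ++ "\n") = PySem.Str.rstrip s := by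
  apply String.toList_inj.mp
  rw [PySem.Str.toList_rstrip, PySem.Str.toList_rstrip]
  rw [show (s ++ "\n").toList = s.toList ++ ['\n'] by simp]
  exact chars_rstrip_nl s.toList

theorem sstrip_app_nl (s : String) : PySem.Str.strip (s ++ "\n") = PySem.Str.strip s := by
  apply String.toList_inj.mp
  rw [PySem.Str.toList_strip, PySem.Str.toList_strip]
  rw [show (s ++ "\n").toList = s.toList ++ ['\n'] by simp]
  exact chars_strip_app_nl s.toList

theorem sstrip_nl_app (s : String) : PySem.Str.strip ("\n" ++ s) = PySem.Str.strip s := by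
  apply String.toList_inj.mp
  rw [PySem.Str.toList_strip, PySem.Str.toList_strip]
  rw [show ("\n" ++ s).toList = '\n' :: s.toList by simp]
  exact chars_strip_cons_nl s.toList

theorem nl_nl : ("\n" ++ "\n" : String) = "\n\n" := by decide

theorem nl2 (s : String) : "\n" ++ ("\n" ++ s) = "\n\n" ++ s := by
  rw [← String.append_assoc, nl_nl]

-- structural facts about collapseRuns / pvParagraphs
theorem collapseRuns_ne_nil (l : String) (rest : List String) :
    collapseRuns (l :: rest) ≠ [] := by
  rw [collapseRuns]
  split <;> simp

theorem collapseRuns_run (t d : List String) (h : ∀ x ∈ t, pvBlank x = false) :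
    collapseRuns (t ++ d) = t ++ collapseRuns d := by
  induction t with
  | nil => simp
  | cons x t ih =>
    rw [List.cons_append, collapseRuns, if_neg (by simp [h x (by simp)])]
    simp [ih (fun y hy => h y (by simp [hy]))]

theorem pvParagraphs_dropWhile (ls : List String) :
    pvParagraphs (ls.dropWhile pvBlank) = pvParagraphs ls := by
  induction ls with
  | nil => rfl
  | cons l rest ih =>
    by_cases h : pvBlank l = true
    · rw [List.dropWhile_cons, if_pos h, ih, pvParagraphs, if_pos h]
    · rw [List.dropWhile_cons, if_neg h]

-- the core correspondence: for a list with a non-blank head, A's collapsed lines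
-- joined with "\n" equal B's paragraphs joined with "\n\n", up to a trailing pad
theorem pad_lemma : ∀ (n : Nat) (ls : List String), ls.length ≤ n →
    (∀ h : ls ≠ [], pvBlank (ls.head h) = false) →
    ∃ pad : String, (pad = "" ∨ pad = "\n") ∧
      PySem.Str.join "\n" (collapseRuns ls) =
        PySem.Str.join "\n\n" ((pvParagraphs ls).map (fun p => PySem.Str.join "\n" p)) ++ pad := by
  intro n
  induction n with
  | zero =>
    intro ls hlen _
    have : ls = [] := List.eq_nil_of_length_eq_zero (Nat.le_zero.mp hlen)
    subst this
    exact ⟨"", Or.inl rfl, by simp [collapseRuns, pvParagraphs, sjoin_nil]⟩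
  | succ n ih =>
    intro ls hlen hhead
    cases ls with
    | nil => exact ⟨"", Or.inl rfl, by simp [collapseRuns, pvParagraphs, sjoin_nil]⟩
    | cons l rest =>
      have hl : pvBlank l = false := hhead (by simp)
      set t := rest.takeWhile (fun x => !pvBlank x) with ht
      set d := rest.dropWhile (fun x => !pvBlank x) with hd
      have hrest : t ++ d = rest := List.takeWhile_append_dropWhile
      have htnb : ∀ x ∈ t, pvBlank x = false := by
        intro x hx
        have := List.mem_takeWhile_imp hx
        simpa using this
      have hC : collapseRuns (l :: rest) = (l :: t) ++ collapseRuns d := by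
        rw [collapseRuns, if_neg (by simp [hl]), ← hrest,
            collapseRuns_run t d htnb]
        simp
      have hP : pvParagraphs (l :: rest) = (l :: t) :: pvParagraphs d := by
        rw [pvParagraphs, if_neg (by simp [hl])]
      cases hd' : d with
      | nil =>
        refine ⟨"", Or.inl rfl, ?_⟩
        rw [hC, hP, hd', collapseRuns]
        simp [pvParagraphs, sjoin_single]
      | cons b d₂ =>
        have hdd : List.dropWhile (fun x => !pvBlank x) rest = b :: d₂ := hd.symm.trans hd'
        have hb : pvBlank b = true := by
          have h2 := List.head_dropWhile_not (fun x => !pvBlank x) (l := rest)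
            (by rw [hdd]; simp)
          simpa [hdd] using h2
        have hCd : collapseRuns d = "" :: collapseRuns (d₂.dropWhile pvBlank) := by
          rw [hd', collapseRuns, if_pos hb]
        have hPd : pvParagraphs d = pvParagraphs (d₂.dropWhile pvBlank) := by
          rw [hd', pvParagraphs, if_pos hb, ← pvParagraphs_dropWhile d₂]
        have hlen₂ : (d₂.dropWhile pvBlank).length ≤ n := by
          have h1 : (d₂.dropWhile pvBlank).length ≤ d₂.length := List.length_dropWhile_le _ _
          have h2 : d.length ≤ rest.length := by rw [hd]; exact List.length_dropWhile_le _ _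
          have h3 : d₂.length < d.length := by rw [hd']; simp
          simp only [List.length_cons] at hlen
          omega
        cases hd₂ : d₂.dropWhile pvBlank with
        | nil =>
          refine ⟨"\n", Or.inr rfl, ?_⟩
          rw [hC, hP, hCd, hd₂, collapseRuns, hPd, hd₂]
          rw [sjoin_append "\n" (l :: t) [""] (by simp) (by simp)]
          simp [pvParagraphs, sjoin_single]
        | cons c d₃ =>
          have hc : pvBlank c = false := by
            simpa [hd₂] using List.head_dropWhile_not pvBlank (l := d₂) (by rw [hd₂]; simp)
          obtain ⟨pad, hpad, heq⟩ := ih (d₂.dropWhile pvBlank) hlen₂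
            (by rw [hd₂]; intro _; simpa using hc)
          refine ⟨pad, hpad, ?_⟩
          have hCne : collapseRuns (d₂.dropWhile pvBlank) ≠ [] := by
            rw [hd₂]; exact collapseRuns_ne_nil c d₃
          have hPne : pvParagraphs (d₂.dropWhile pvBlank) ≠ [] := by
            rw [hd₂, pvParagraphs, if_neg (by simp [hc])]; simp
          rw [hC, hP, hCd, hPd]
          rw [sjoin_append "\n" (l :: t) ("" :: collapseRuns (d₂.dropWhile pvBlank))
                (by simp) (by simp)]
          rw [sjoin_cons_ne "\n" "" _ hCne, heq]
          rw [List.map_cons,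
              sjoin_cons_ne "\n\n" _ _ (by simpa using hPne)]
          simp only [← nl_nl, String.append_assoc, String.empty_append]

theorem strip_pad (x pad : String) (h : pad = "" ∨ pad = "\n") :
    PySem.Str.strip (x ++ pad) = PySem.Str.strip x := by
  rcases h with h | h <;> subst h
  · simp
  · exact sstrip_app_nl x

theorem pv_nw_eq (text : String) :
    normalize_whitespace text = normalize_whitespace_alt text := by
  unfold normalize_whitespace normalize_whitespace_alt
  simp only [(foldl_eq_collapseRuns _).1 [], List.nil_append]
  set lines := (PySem.Str.splitlines text).map (fun l => PySem.Str.rstrip l) with hlines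
  clear_value lines
  cases lines with
  | nil => simp [collapseRuns, pvParagraphs, sjoin_nil]
  | cons l rest =>
    by_cases hl : pvBlank l = true
    · rw [collapseRuns, if_pos hl, pvParagraphs, if_pos hl, ← pvParagraphs_dropWhile rest]
      cases hdr : rest.dropWhile pvBlank with
      | nil => simp [collapseRuns, pvParagraphs, sjoin_single, sjoin_nil]
      | cons c d =>
        have hc : pvBlank c = false := by
          simpa [hdr] using List.head_dropWhile_not pvBlank (l := rest) (by rw [hdr]; simp)
        obtain ⟨pad, hpad, heq⟩ := pad_lemma (c :: d).length (c :: d) le_rfl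
          (by intro _; simpa using hc)
        rw [sjoin_cons_ne "\n" "" _ (collapseRuns_ne_nil c d), heq]
        rw [show ("" : String) ++ "\n" ++
              (PySem.Str.join "\n\n" ((pvParagraphs (c :: d)).map (fun p => PySem.Str.join "\n" p)) ++ pad)
            = ("\n" ++ (PySem.Str.join "\n\n" ((pvParagraphs (c :: d)).map (fun p => PySem.Str.join "\n" p)) ++ pad)) by
          simp]
        rw [sstrip_nl_app]
        exact strip_pad _ pad hpad
    · obtain ⟨pad, hpad, heq⟩ := pad_lemma (l :: rest).length (l :: rest) le_rfl
        (by intro _; simpa using hl)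
      rw [heq, strip_pad _ pad hpad]

-- join2 shifts through a block built as h ++ "\n\n" ++ b
theorem j2_shift (h b : String) (rest : List String) :
    PySem.Str.join "\n\n" ((h ++ "\n\n" ++ b) :: rest) =
      h ++ "\n\n" ++ PySem.Str.join "\n\n" (b :: rest) := by
  cases rest with
  | nil => simp [sjoin_single]
  | cons r rs => rw [sjoin_cons, sjoin_cons]; simp [String.append_assoc]

-- the markdown skeleton: flat parts list with "" separators vs per-section blocks
theorem md_join (ss : List (String × String)) : ∀ a : String,
    PySem.Str.join "\n" (a :: "" :: ss.flatMap (fun sec =>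
        ["## " ++ sec.1, "",
         (if (normalize_whitespace_alt sec.2).toList.isEmpty then "_No text extracted._"
          else normalize_whitespace_alt sec.2), ""])) =
    PySem.Str.join "\n\n" (a :: ss.map (fun sec =>
        "## " ++ sec.1 ++ "\n\n" ++
          (if (normalize_whitespace_alt sec.2).toList.isEmpty then "_No text extracted._"
           else normalize_whitespace_alt sec.2))) ++ "\n" := by
  induction ss with
  | nil =>
    intro a
    rw [List.flatMap_nil, List.map_nil, sjoin_cons, sjoin_single, sjoin_single]
    simp
  | cons sec ss ih =>
    intro a
    simp only [List.flatMap_cons, List.map_cons, List.cons_append, List.nil_append]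
    rw [sjoin_cons, sjoin_cons, sjoin_cons, sjoin_cons, ih,
        sjoin_cons_ne "\n\n" a _ (by simp), j2_shift]
    simp [nl2, String.append_assoc]

theorem md_skeleton (title : String) (sections : List (String × String)) :
    markdown_best title sections = markdown_best_alt title sections := by
  simp only [markdown_best, markdown_best_alt]
  rw [PySem.List.foldl_append_eq_flatMap]
  simp only [pv_nw_eq]
  rw [show (["# " ++ title, ""] : List String) ++ sections.flatMap (fun sec =>
        ["## " ++ sec.1, "",
         (if (normalize_whitespace_alt sec.2).toList.isEmpty then "_No text extracted._"
          else normalize_whitespace_alt sec.2), ""]) =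
        ("# " ++ title) :: "" :: sections.flatMap (fun sec =>
          ["## " ++ sec.1, "",
           (if (normalize_whitespace_alt sec.2).toList.isEmpty then "_No text extracted._"
            else normalize_whitespace_alt sec.2), ""]) from rfl]
  rw [md_join sections ("# " ++ title), srstrip_nl]

-- ===== VERDICT (by name: the statement is the Claim_ definition above) =====
theorem markdown_best_spec : Claim_equal_markdown_best := by
  intro title sections _
  unfold Spec_markdown_best
  exact md_skeleton title sections
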